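-- pv_equiv track=rewrite | github.com/echxanh133421/leetcode | 2120 Execution of All Suffix Instructions Staying in.py | excute
-- ===== SOURCE A (Python) =====
-- def excute(start, step, n):
--     count = 0
--     a = start.copy()
--     for i in range(len(step)):
--         if step[i] == 'U':
--             a[0] -= 1
--         elif step[i] == 'D':
--             a[0] += 1
--         elif step[i] == 'R':
--             a[1] += 1
--         elif step[i] == 'L':
--             a[1] -= 1
--
--         if not (a[0] >= 0 and a[0] <= n - 1) or not (a[1] >= 0 and a[1] <= n - 1):
--             break
--         count += 1
--     return count
-- ===== SOURCE B (Python) =====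
-- def excute(start, step, n):
--     if not step:
--         return 0
--     moves = {'U': (-1, 0), 'D': (1, 0), 'R': (0, 1), 'L': (0, -1)}
--     r, c = start[0], start[1]
--     positions = []
--     for ch in step:
--         dr, dc = moves.get(ch, (0, 0))
--         r += dr
--         c += dc
--         positions.append((r, c))
--     for i, (r, c) in enumerate(positions):
--         if not (0 <= r < n and 0 <= c < n):
--             return i
--     return len(step)
-- ===== Notes on version B (the rewrite author's own statement) =====
-- stated objective: alternative
-- what changed: B precomputes the whole trajectory as a list of positions via a displacement table, then does a separate first-out-of-bounds scan with enumerate, instead of A's interleaved move/check/break loop mutating a copied list.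
-- outside the precondition, e.g. on excute([5], 'R', 3): A raises IndexError, B raises IndexError; on excute([-3], 'ayR baU 91', -1): A returns 0, B raises IndexError
import Mathlib
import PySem

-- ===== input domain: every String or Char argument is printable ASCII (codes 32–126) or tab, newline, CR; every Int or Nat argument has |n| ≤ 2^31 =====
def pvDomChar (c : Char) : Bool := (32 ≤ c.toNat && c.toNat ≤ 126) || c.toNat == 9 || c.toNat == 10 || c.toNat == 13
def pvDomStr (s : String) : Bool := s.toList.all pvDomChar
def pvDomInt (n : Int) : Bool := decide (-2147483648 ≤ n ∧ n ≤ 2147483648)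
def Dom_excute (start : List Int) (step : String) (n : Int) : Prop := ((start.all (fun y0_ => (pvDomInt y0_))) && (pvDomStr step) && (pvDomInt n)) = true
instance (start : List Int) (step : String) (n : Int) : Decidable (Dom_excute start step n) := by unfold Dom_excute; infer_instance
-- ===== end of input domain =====

-- B builds the full trajectory first and then searches it for the first out-of-bounds
-- position, instead of A's interleaved move/check/break loop (objective: alternative decomposition).

-- ===== PORT A =====
-- A's for-loop with break: structural recursion over the characters of step,
-- carrying count and the mutated copy a of start (in-range list indexing: a[0]/a[1]
-- are exact here because Pre_ guarantees 2 ≤ start.length when the loop runs).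
def excuteLoopA (n : Int) : List Char → Int → List Int → Int
  | [], count, _ => count
  | ch :: rest, count, a =>
    let a :=
      if ch = 'U' then a.set 0 (a.getD 0 0 - 1)
      else if ch = 'D' then a.set 0 (a.getD 0 0 + 1)
      else if ch = 'R' then a.set 1 (a.getD 1 0 + 1)
      else if ch = 'L' then a.set 1 (a.getD 1 0 - 1)
      else a
    if ¬(a.getD 0 0 ≥ 0 ∧ a.getD 0 0 ≤ n - 1) ∨ ¬(a.getD 1 0 ≥ 0 ∧ a.getD 1 0 ≤ n - 1) then count
    else excuteLoopA n rest (count + 1) a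

def excute (start : List Int) (step : String) (n : Int) : Int :=
  excuteLoopA n step.toList 0 start

-- ===== PORT B =====
-- Source B's moves dict
def movesDict : PySem.Dict Char (Int × Int) :=
  PySem.Dict.ofList [('U', (-1, 0)), ('D', (1, 0)), ('R', (0, 1)), ('L', (0, -1))]

-- first pass of Source B: build the list of positions visited after each step
def buildPos : List Char → Int → Int → List (Int × Int)
  | [], _, _ => []
  | ch :: rest, r, c =>
    let d := movesDict.getD ch (0, 0)
    let r := r + d.1
    let c := c + d.2
    (r, c) :: buildPos rest r c

-- second pass of Source B: enumerate and return the first out-of-bounds index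
def firstBad (n : Int) : List (Int × Int) → Int → Option Int
  | [], _ => none
  | (r, c) :: rest, i =>
    if ¬(0 ≤ r ∧ r < n ∧ 0 ≤ c ∧ c < n) then some i else firstBad n rest (i + 1)

def excute_alt (start : List Int) (step : String) (n : Int) : Int :=
  if step.toList = [] then 0
  else
    let pos := buildPos step.toList (start.getD 0 0) (start.getD 1 0)
    match firstBad n pos 0 with
    | some i => i
    | none => (step.toList.length : Int)

-- ===== PRECONDITION & SPEC =====
-- Pre_ excludes nonempty step with fewer than two coordinates in start: there A usually
-- raises IndexError, and B (which reads both coordinates up front) always does; A returns a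
-- value there only when it happens to break out of bounds on a[0] before ever touching a[1].
def Pre_excute (start : List Int) (step : String) (n : Int) : Prop :=
  2 ≤ start.length ∨ step = ""
instance (start : List Int) (step : String) (n : Int) : Decidable (Pre_excute start step n) := by unfold Pre_excute; infer_instance
def pvWitness_excute : List Int × String × Int := ([0, 0], "RRDD", 3)

def Spec_excute (start : List Int) (step : String) (n : Int) (out : Int) : Prop := out = excute_alt start step n
instance (start : List Int) (step : String) (n : Int) (out : Int) : Decidable (Spec_excute start step n out) := by unfold Spec_excute; infer_instance

-- ===== CLAIM (what is proved, stated in full; the proofs are below) =====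
def Claim_equal_excute : Prop := ∀ (start : List Int) (step : String) (n : Int), Dom_excute start step n → Pre_excute start step n → Spec_excute start step n (excute start step n)

-- ===== LEMMAS AND PROOFS =====

-- reference walk: the common meaning of both loops
def walk (n : Int) : List Char → Int → Int → Int
  | [], _, _ => 0
  | ch :: rest, r, c =>
    let d := movesDict.getD ch (0, 0)
    let r := r + d.1
    let c := c + d.2
    if ¬(0 ≤ r ∧ r < n ∧ 0 ≤ c ∧ c < n) then 0 else 1 + walk n rest r c

theorem excuteLoopA_walk (n : Int) (cs : List Char) :
    ∀ (count : Int) (a : List Int), 2 ≤ a.length →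
      excuteLoopA n cs count a = count + walk n cs (a.getD 0 0) (a.getD 1 0) := by
  induction cs with
  | nil => intro count a _; simp [excuteLoopA, walk]
  | cons ch rest ih =>
    intro count a ha
    obtain ⟨x, y, t, rfl⟩ : ∃ x y t, a = x :: y :: t := by
      match a, ha with | x :: y :: t, _ => exact ⟨x, y, t, rfl⟩
    have hd : movesDict.getD ch (0, 0) =
        (if ch = 'U' then ((-1 : Int), (0 : Int))
         else if ch = 'D' then (1, 0)
         else if ch = 'R' then (0, 1)
         else if ch = 'L' then (0, -1)
         else (0, 0)) := by
      by_cases h1 : ch = 'U'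
      · subst h1; decide
      by_cases h2 : ch = 'D'
      · subst h2; decide
      by_cases h3 : ch = 'R'
      · subst h3; decide
      by_cases h4 : ch = 'L'
      · subst h4; decide
      have hitems : movesDict.items =
          [('U', ((-1 : Int), (0 : Int))), ('D', (1, 0)), ('R', (0, 1)), ('L', (0, -1))] := by
        decide
      have e1 : ('U' == ch) = false := by simp [Ne.symm h1]
      have e2 : ('D' == ch) = false := by simp [Ne.symm h2]
      have e3 : ('R' == ch) = false := by simp [Ne.symm h3]
      have e4 : ('L' == ch) = false := by simp [Ne.symm h4]
      simp [PySem.Dict.getD, PySem.Dict.get?, hitems, List.find?,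
            e1, e2, e3, e4, h1, h2, h3, h4]
    have ha' : (if ch = 'U' then ((x :: y :: t).set 0 ((x :: y :: t).getD 0 0 - 1))
         else if ch = 'D' then ((x :: y :: t).set 0 ((x :: y :: t).getD 0 0 + 1))
         else if ch = 'R' then ((x :: y :: t).set 1 ((x :: y :: t).getD 1 0 + 1))
         else if ch = 'L' then ((x :: y :: t).set 1 ((x :: y :: t).getD 1 0 - 1))
         else (x :: y :: t))
        = (x + (movesDict.getD ch (0, 0)).1) :: (y + (movesDict.getD ch (0, 0)).2) :: t := by
      rw [hd]
      split_ifs <;> simp [List.set, List.getD, sub_eq_add_neg]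
    simp only [excuteLoopA, ha', walk]
    simp only [List.getD, List.getElem?_cons_zero, List.getElem?_cons_succ, Option.getD_some]
    by_cases hb : (0 ≤ x + (movesDict.getD ch (0, 0)).1 ∧ x + (movesDict.getD ch (0, 0)).1 < n ∧
        0 ≤ y + (movesDict.getD ch (0, 0)).2 ∧ y + (movesDict.getD ch (0, 0)).2 < n)
    · rw [if_neg (by omega), if_neg (by simpa using hb),
        ih (count + 1) ((x + (movesDict.getD ch (0, 0)).1) :: (y + (movesDict.getD ch (0, 0)).2) :: t) (by simp)]
      simp only [List.getD, List.getElem?_cons_zero, List.getElem?_cons_succ, Option.getD_some]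
      ring
    · rw [if_pos (by omega), if_pos (by simpa using hb)]
      ring

theorem firstBad_buildPos_walk (n : Int) (cs : List Char) :
    ∀ (r c i : Int),
      (match firstBad n (buildPos cs r c) i with
        | some j => j
        | none => i + (cs.length : Int)) = i + walk n cs r c := by
  induction cs with
  | nil => intro r c i; simp [buildPos, firstBad, walk]
  | cons ch rest ih =>
    intro r c i
    simp only [buildPos, firstBad, walk]
    split_ifs with h
    case _ =>
      have h2 := ih (r + (movesDict.getD ch (0, 0)).1) (c + (movesDict.getD ch (0, 0)).2) (i + 1)
      cases hfb : firstBad n (buildPos rest (r + (movesDict.getD ch (0, 0)).1)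
          (c + (movesDict.getD ch (0, 0)).2)) (i + 1)
      · simp only [hfb, List.length_cons] at h2 ⊢
        push_cast at h2 ⊢
        linarith
      · simp only [hfb] at h2 ⊢
        linarith
    case _ => simp

-- ===== VERDICT (by name: the statement is the Claim_ definition above) =====
theorem excute_spec : Claim_equal_excute := by
  intro start step n _ hpre
  unfold Spec_excute excute excute_alt
  rcases hpre with h2 | hempty
  · by_cases he : step.toList = []
    · simp [he, excuteLoopA]
    · rw [excuteLoopA_walk n step.toList 0 start h2, if_neg he]
      have := firstBad_buildPos_walk n step.toList (start.getD 0 0) (start.getD 1 0) 0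
      simpa using this.symm
  · subst hempty
    simp [excuteLoopA]
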